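-- pv_equiv track=rewrite | github.com/lukasz-lesiak/AdventOfCode22 | AdventOfCode22/day15/Puzzle30.py | lineDL
-- ===== SOURCE A (Python) =====
-- def lineDL(p1, p2):
--     x_list = []
--     y_list = []
--     for x in range(p2[0], p1[0] + 1):
--         x_list.append(x)
--     for y in range(p2[1], p1[1] + 1):
--         y_list.append(y)
--     return list(zip(reversed(x_list), reversed(y_list)))
-- ===== SOURCE B (Python) =====
-- def lineDL(p1, p2):
--     n = min(max(0, p1[0] - p2[0] + 1), max(0, p1[1] - p2[1] + 1))
--     return [(p1[0] - i, p1[1] - i) for i in range(n)]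
-- ===== Notes on version B (the rewrite author's own statement) =====
-- stated objective: simpler
-- what changed: Replaces the two appended coordinate lists and the reversed/zip pipeline with a closed-form point count n and a single arithmetic comprehension emitting (p1[0]-i, p1[1]-i) from the high corner downward.
import Mathlib
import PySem

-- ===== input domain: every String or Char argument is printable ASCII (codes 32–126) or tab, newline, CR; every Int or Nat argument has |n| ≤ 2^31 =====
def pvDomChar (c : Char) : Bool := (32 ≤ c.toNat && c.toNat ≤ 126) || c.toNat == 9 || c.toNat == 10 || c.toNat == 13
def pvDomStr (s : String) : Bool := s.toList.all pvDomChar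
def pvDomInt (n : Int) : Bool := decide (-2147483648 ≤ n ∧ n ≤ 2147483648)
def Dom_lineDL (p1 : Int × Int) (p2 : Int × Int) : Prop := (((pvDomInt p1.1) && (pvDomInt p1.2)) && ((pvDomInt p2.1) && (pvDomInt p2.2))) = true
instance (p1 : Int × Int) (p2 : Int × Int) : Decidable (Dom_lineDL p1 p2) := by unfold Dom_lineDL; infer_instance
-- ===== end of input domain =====

-- B computes the point count in closed form and emits the diagonal arithmetically,
-- instead of A's two appended coordinate lists fed through a reversed/zip pipeline (objective: simpler).

-- ===== PORT A =====
def lineDL (p1 : Int × Int) (p2 : Int × Int) : List (Int × Int) :=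
  let x_list : List Int := (PySem.List.pyRange p2.1 (p1.1 + 1) 1).foldl (fun acc x => acc ++ [x]) []
  let y_list : List Int := (PySem.List.pyRange p2.2 (p1.2 + 1) 1).foldl (fun acc y => acc ++ [y]) []
  x_list.reverse.zip y_list.reverse

-- ===== PORT B =====
def lineDL_alt (p1 : Int × Int) (p2 : Int × Int) : List (Int × Int) :=
  let n : Int := min (max 0 (p1.1 - p2.1 + 1)) (max 0 (p1.2 - p2.2 + 1))
  (List.range n.toNat).map (fun (i : Nat) => (p1.1 - (i : Int), p1.2 - (i : Int)))

-- ===== PRECONDITION & SPEC =====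
def Spec_lineDL (p1 : Int × Int) (p2 : Int × Int) (out : List (Int × Int)) : Prop := out = lineDL_alt p1 p2
instance (p1 : Int × Int) (p2 : Int × Int) (out : List (Int × Int)) : Decidable (Spec_lineDL p1 p2 out) := by unfold Spec_lineDL; infer_instance

-- ===== CLAIM (what is proved, stated in full; the proofs are below) =====
def Claim_equal_lineDL : Prop := ∀ (p1 : Int × Int) (p2 : Int × Int), Dom_lineDL p1 p2 → Spec_lineDL p1 p2 (lineDL p1 p2)

-- ===== LEMMAS AND PROOFS =====

theorem pv_foldl_append (l acc : List Int) :
    l.foldl (fun acc x => acc ++ [x]) acc = acc ++ l := by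
  induction l generalizing acc with
  | nil => simp
  | cons a t ih => simp [List.foldl, ih]

theorem pv_reverse_pyRange (a b : Int) :
    (PySem.List.pyRange a (b + 1) 1).reverse
      = (List.range (b + 1 - a).toNat).map (fun (k : Nat) => b - (k : Int)) := by
  apply List.ext_getElem
  · simp [PySem.List.length_pyRange_one]
  · intro i h1 h2
    simp only [List.getElem_reverse, PySem.List.getElem_pyRange_one,
      PySem.List.length_pyRange_one, List.getElem_map, List.getElem_range,
      List.length_reverse] at h1 h2 ⊢
    omega

theorem pv_zip_map_range {α β : Type} (m l : Nat) (f : Nat → α) (g : Nat → β) :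
    ((List.range m).map f).zip ((List.range l).map g)
      = (List.range (min m l)).map (fun k => (f k, g k)) := by
  apply List.ext_getElem
  · simp
  · intro i h1 h2
    simp at h1 ⊢

-- ===== VERDICT (by name: the statement is the Claim_ definition above) =====
theorem lineDL_spec : Claim_equal_lineDL := by
  intro p1 p2 _
  unfold Spec_lineDL lineDL lineDL_alt
  rw [pv_foldl_append, pv_foldl_append]
  simp only [List.nil_append]
  rw [pv_reverse_pyRange, pv_reverse_pyRange, pv_zip_map_range]
  have hn : (min (max 0 (p1.1 - p2.1 + 1)) (max 0 (p1.2 - p2.2 + 1))).toNat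
      = min (p1.1 + 1 - p2.1).toNat (p1.2 + 1 - p2.2).toNat := by omega
  rw [hn]
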